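-- pv_equiv track=rewrite | github.com/mahdinaija7/django-diff-checker | checker/diffchecker.py | span_it
-- ===== SOURCE A (Python) =====
-- def span_it(_list, start, _class):
--     filter_start = "- " if start == "+ " else "+ "
--     _list = list(filter(lambda x: not x.startswith(filter_start), _list))
--     temp_list = list()
--     string_result = ""
--     for char in _list:
--         if char.startswith(start):
--             temp_list.append(char[2:])
--         else:
--             if len(temp_list) > 0:
--                 string_result += "<span class='{}'>{}</span>".format(
--                     _class, "".join(temp_list)
--                 )
--                 temp_list.clear()
--             string_result += char[2:]
--
--     if len(temp_list) > 0:
--         string_result += "<span class='{}'>{}</span>".format(_class, "".join(temp_list))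
--     return string_result
-- ===== SOURCE B (Python) =====
-- def span_it(_list, start, _class):
--     filter_start = "- " if start == "+ " else "+ "
--     lines = [x for x in _list if not x.startswith(filter_start)]
--
--     def render(lines):
--         # emit one maximal run of same-key lines, then recurse on the rest
--         if not lines:
--             return ""
--         key = lines[0].startswith(start)
--         i = 1
--         while i < len(lines) and lines[i].startswith(start) == key:
--             i += 1
--         body = "".join(line[2:] for line in lines[:i])
--         piece = "<span class='{}'>{}</span>".format(_class, body) if key else body
--         return piece + render(lines[i:])
--
--     return render(lines)
-- ===== Notes on version B (the rewrite author's own statement) =====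
-- stated objective: simpler
-- what changed: A's flush-on-transition loop with a temp_list accumulator and a duplicated trailing flush is replaced by a recursive split of the filtered lines into maximal consecutive same-key runs, each run rendered as one piece with no carried state.
import Mathlib
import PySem

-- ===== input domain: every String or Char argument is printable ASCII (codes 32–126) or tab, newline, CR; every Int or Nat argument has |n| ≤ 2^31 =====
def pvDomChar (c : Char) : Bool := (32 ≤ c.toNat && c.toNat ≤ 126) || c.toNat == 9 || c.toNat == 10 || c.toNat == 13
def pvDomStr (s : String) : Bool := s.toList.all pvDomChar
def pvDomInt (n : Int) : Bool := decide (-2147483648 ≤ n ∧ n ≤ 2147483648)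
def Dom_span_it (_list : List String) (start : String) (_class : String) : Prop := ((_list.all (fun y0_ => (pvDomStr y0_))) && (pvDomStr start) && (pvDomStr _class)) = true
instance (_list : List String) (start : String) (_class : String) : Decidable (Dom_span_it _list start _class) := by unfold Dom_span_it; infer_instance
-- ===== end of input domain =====

-- B replaces A's flush-on-transition accumulator loop with a recursive split into
-- maximal consecutive runs (same filter step); objective: simpler decomposition, same cost.

-- ===== PORT A =====
-- "<span class='{}'>{}</span>".format(_class, body)
def spanWrap (cls body : String) : String := "<span class='" ++ cls ++ "'>" ++ body ++ "</span>"

-- the body of A's `for char in _list` loop, state = (temp_list, string_result)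
def stepA (start cls : String) (st : List String × String) (c : String) : List String × String :=
  if PySem.Str.startswith c start then
    (st.1 ++ [PySem.Str.slice c (some 2) none], st.2)
  else
    (([] : List String),
      (if 0 < st.1.length then st.2 ++ spanWrap cls (PySem.Str.join "" st.1) else st.2)
        ++ PySem.Str.slice c (some 2) none)

-- A's trailing `if len(temp_list) > 0: …` + return
def finishA (cls : String) (st : List String × String) : String :=
  if 0 < st.1.length then st.2 ++ spanWrap cls (PySem.Str.join "" st.1) else st.2

def span_it (_list : List String) (start : String) (_class : String) : String :=
  let filter_start := if start = "+ " then "- " else "+ "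
  let l := _list.filter (fun x => !(PySem.Str.startswith x filter_start))
  finishA _class (l.foldl (stepA start _class) (([] : List String), ""))

-- ===== PORT B =====
-- B's `render`: peel one maximal run of same-key lines (the index-advancing while
-- loop becomes takeWhile/dropWhile), emit its piece, recurse on the rest.
def spanRender (start cls : String) : List String → String
  | [] => ""
  | x :: xs =>
    let k := PySem.Str.startswith x start
    let run := xs.takeWhile (fun y => PySem.Str.startswith y start == k)
    let rest := xs.dropWhile (fun y => PySem.Str.startswith y start == k)
    let body := PySem.Str.join "" ((x :: run).map (fun line => PySem.Str.slice line (some 2) none))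
    (if k then spanWrap cls body else body) ++ spanRender start cls rest
termination_by l => l.length
decreasing_by
  exact Nat.lt_succ_of_le (List.length_dropWhile_le _ _)

def span_it_alt (_list : List String) (start : String) (_class : String) : String :=
  let filter_start := if start = "+ " then "- " else "+ "
  let lines := _list.filter (fun x => !(PySem.Str.startswith x filter_start))
  spanRender start _class lines

-- ===== PRECONDITION & SPEC =====
def Spec_span_it (_list : List String) (start : String) (_class : String) (out : String) : Prop := out = span_it_alt _list start _class
instance (_list : List String) (start : String) (_class : String) (out : String) : Decidable (Spec_span_it _list start _class out) := by unfold Spec_span_it; infer_instance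

-- ===== CLAIM (what is proved, stated in full; the proofs are below) =====
def Claim_equal_span_it : Prop := ∀ (_list : List String) (start : String) (_class : String), Dom_span_it _list start _class → Spec_span_it _list start _class (span_it _list start _class)

-- ===== LEMMAS AND PROOFS =====

-- pending temp_list (tails already taken) plus a run of raw start-lines, flushed as one span (or nothing)
def flushSpan (_start cls : String) (temp : List String) (run : List String) : String :=
  let ts := temp ++ run.map (fun line => PySem.Str.slice line (some 2) none)
  if 0 < ts.length then spanWrap cls (PySem.Str.join "" ts) else ""

theorem flushSpan_cons {start cls : String} (x : String) (temp run : List String) :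
    flushSpan start cls temp (x :: run) =
      flushSpan start cls (temp ++ [PySem.Str.slice x (some 2) none]) run := by
  unfold flushSpan
  rw [show temp ++ List.map (fun line => PySem.Str.slice line (some 2) none) (x :: run)
      = (temp ++ [PySem.Str.slice x (some 2) none]) ++
        List.map (fun line => PySem.Str.slice line (some 2) none) run by simp]

theorem str_empty_append (s : String) : "" ++ s = s := by
  apply String.toList_inj.mp
  simp

theorem spanRender_cons_false (start cls : String) (x : String) (xs : List String)
    (hx : PySem.Str.startswith x start = false) :
    spanRender start cls (x :: xs) = PySem.Str.slice x (some 2) none ++ spanRender start cls xs := by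
  rw [spanRender]
  simp only [hx, beq_false]
  cases xs with
  | nil =>
    apply String.toList_inj.mp
    simp [PySem.Str.toList_join, PySem.Chars.join_singleton]
  | cons y ys =>
    by_cases hy : PySem.Str.startswith y start = true
    · simp only [List.takeWhile_cons, List.dropWhile_cons, hy, Bool.not_true]
      apply String.toList_inj.mp
      simp [PySem.Str.toList_join, PySem.Chars.join_singleton]
    · rw [spanRender]
      simp only [Bool.not_eq_true] at hy
      simp only [List.takeWhile_cons, List.dropWhile_cons, hy, Bool.not_false, if_true, beq_false]
      apply String.toList_inj.mp
      simp [PySem.Str.toList_join, PySem.Chars.join_cons_cons, String.toList_append,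
        List.append_assoc]

theorem spanRender_decomp (start cls : String) (l : List String) :
    spanRender start cls l =
      flushSpan start cls [] (l.takeWhile (fun y => PySem.Str.startswith y start))
        ++ spanRender start cls (l.dropWhile (fun y => PySem.Str.startswith y start)) := by
  cases l with
  | nil =>
    apply String.toList_inj.mp
    simp [spanRender, flushSpan]
  | cons x xs =>
    by_cases hx : PySem.Str.startswith x start = true
    · rw [spanRender]
      simp only [List.takeWhile_cons, List.dropWhile_cons, hx, if_true, beq_true]
      simp [flushSpan]
    · simp only [Bool.not_eq_true] at hx
      simp only [List.takeWhile_cons, List.dropWhile_cons, hx]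
      apply String.toList_inj.mp
      simp [flushSpan]

theorem loopA (start cls : String) (l : List String) (temp : List String) (res : String) :
    finishA cls (l.foldl (stepA start cls) (temp, res)) =
      res ++ flushSpan start cls temp (l.takeWhile (fun y => PySem.Str.startswith y start))
          ++ spanRender start cls (l.dropWhile (fun y => PySem.Str.startswith y start)) := by
  induction l generalizing temp res with
  | nil =>
    simp only [List.foldl_nil, List.takeWhile_nil, List.dropWhile_nil, finishA, flushSpan,
      List.map_nil, List.append_nil, spanRender]
    by_cases h : 0 < temp.length
    · simp only [h, if_true]
      apply String.toList_inj.mp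
      simp
    · simp only [h, if_false]
      apply String.toList_inj.mp
      simp
  | cons x xs ih =>
    by_cases hx : PySem.Str.startswith x start = true
    · simp only [List.foldl_cons, stepA, hx, if_true, List.takeWhile_cons, List.dropWhile_cons]
      rw [ih, flushSpan_cons x _ (List.takeWhile (fun y => PySem.Str.startswith y start) xs)]
    · simp only [Bool.not_eq_true] at hx
      simp only [List.foldl_cons, stepA, hx, Bool.false_eq_true, if_false, List.takeWhile_cons,
        List.dropWhile_cons]
      rw [ih]
      rw [spanRender_cons_false start cls x xs hx, spanRender_decomp start cls xs]
      by_cases h : 0 < temp.length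
      · simp only [h, if_true, flushSpan, List.nil_append, List.map_nil, List.append_nil]
        apply String.toList_inj.mp
        simp [List.append_assoc]
      · simp only [h, if_false, flushSpan, List.nil_append, List.map_nil, List.append_nil]
        apply String.toList_inj.mp
        simp [List.append_assoc]

-- ===== VERDICT (by name: the statement is the Claim_ definition above) =====
theorem span_it_spec : Claim_equal_span_it := by
  intro _list start _class _dom
  unfold Spec_span_it span_it span_it_alt
  rw [loopA, str_empty_append, ← spanRender_decomp]
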